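-- pv_equiv track=rewrite | github.com/KivenCkl/LeetCode | Problemset/re-space-lcci/re-space-lcci.py | respace
-- ===== SOURCE A (Python) =====
-- from typing import List
--
-- def respace(dictionary: List[str], sentence: str) -> int:
--     # 动态规划，dp[i] 表示句子字串 sentence[:i] 未匹配的最小长度
--     count_array = [0 for _ in range(len(sentence)+1)]
--     for i in range(1, len(sentence)+1):
--         count_array[i] = count_array[i-1] + 1
--         for word in dictionary:
--             if i < len(word):
--                 continue
--             word_in_sentence = sentence[i-len(word):i]
--             if word == word_in_sentence:
--                 count_array[i] = min(count_array[i], count_array[i-len(word)])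
--     return count_array[-1]
-- ===== SOURCE B (Python) =====
-- def respace(dictionary, sentence):
--     # DP over split positions with a word set and a length-bounded window,
--     # instead of scanning the whole dictionary at every position.
--     words = set(dictionary)
--     max_len = max(map(len, dictionary), default=0)
--     dp = [0]
--     for i in range(1, len(sentence) + 1):
--         best = dp[i - 1] + 1
--         for j in range(max(0, i - max_len), i):
--             if sentence[j:i] in words:
--                 best = min(best, dp[j])
--         dp.append(best)
--     return dp[-1]
-- ===== Notes on version B (the rewrite author's own statement) =====
-- stated objective: faster
-- what changed: Replaces the per-position scan over the whole dictionary (with a substring comparison per word) by a set of words and a window bounded by the maximum word length: dp computed by scanning only the last max_len split points and testing membership in a hash set.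
import Mathlib
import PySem

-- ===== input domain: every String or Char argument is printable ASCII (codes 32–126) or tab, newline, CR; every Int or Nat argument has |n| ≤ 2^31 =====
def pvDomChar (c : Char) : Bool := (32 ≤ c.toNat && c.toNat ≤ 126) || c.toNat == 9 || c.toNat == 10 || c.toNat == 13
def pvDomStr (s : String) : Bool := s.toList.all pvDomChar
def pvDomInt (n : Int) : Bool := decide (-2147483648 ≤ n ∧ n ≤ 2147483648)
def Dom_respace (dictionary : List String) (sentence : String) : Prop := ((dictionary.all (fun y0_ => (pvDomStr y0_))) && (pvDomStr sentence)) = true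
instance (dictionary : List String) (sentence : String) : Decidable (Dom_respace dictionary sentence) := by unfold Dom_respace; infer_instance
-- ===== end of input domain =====

-- B replaces A's per-position scan over the whole dictionary by a word set plus a window
-- bounded by the maximum word length. Strings are handled as List Char (PySem convention).

-- ===== PORT A =====
-- inner loop body: `for word in dictionary: …`
def respaceInnerA (s : List Char) (i : Int) (ca : List Int) (word : List Char) : List Int :=
  if i < (word.length : Int) then ca       -- if i < len(word): continue
  else
    let wis := PySem.Chars.slice s (some (i - (word.length : Int))) (some i)   -- sentence[i-len(word):i]
    if word = wis then
      ca.set i.toNat (min ((PySem.List.pyGet? ca i).getD 0)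
                          ((PySem.List.pyGet? ca (i - (word.length : Int))).getD 0))
    else ca

-- outer loop body: one iteration of `for i in range(1, len(sentence)+1)`
def respaceBodyA (dictL : List (List Char)) (s : List Char) (ca : List Int) (i : Int) : List Int :=
  let ca := ca.set i.toNat ((PySem.List.pyGet? ca (i-1)).getD 0 + 1)  -- count_array[i] = count_array[i-1] + 1
  dictL.foldl (respaceInnerA s i) ca

def respace (dictionary : List String) (sentence : String) : Int :=
  let s := sentence.toList
  let n := s.length
  let dictL := dictionary.map String.toList
  let ca0 : List Int := (List.range (n+1)).map (fun _ => (0:Int))  -- [0 for _ in range(len(sentence)+1)]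
  let ca := (PySem.List.pyRange 1 ((n : Int)+1) 1).foldl (respaceBodyA dictL s) ca0
  (PySem.List.pyGet? ca (-1)).getD 0                               -- return count_array[-1]

-- ===== PORT B =====
-- one iteration of `for i in range(1, len(sentence)+1)`
def respaceAltBody (words : PySem.Set (List Char)) (maxLen : Nat) (s : List Char) (dp : List Int) (i : Nat) : List Int :=
  let best := dp.getD (i-1) 0 + 1                          -- best = dp[i-1] + 1
  let lo := i - maxLen                                     -- max(0, i - max_len): Nat subtraction clamps at 0
  let best := (List.range' lo (i - lo)).foldl              -- for j in range(lo, i)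
    (fun best (j : Nat) =>
      if PySem.Set.contains words (PySem.Chars.slice s (some (j:Int)) (some (i:Int)))  -- sentence[j:i] in words
      then min best (dp.getD j 0) else best) best
  dp ++ [best]                                             -- dp.append(best)

def respace_alt (dictionary : List String) (sentence : String) : Int :=
  let words : PySem.Set (List Char) := PySem.Set.ofList (dictionary.map String.toList)  -- set(dictionary)
  -- max(map(len, dictionary), default=0): lengths are Nats, so a foldl max 0 is exact
  let maxLen : Nat := (dictionary.map (fun w => w.toList.length)).foldl max 0
  let s := sentence.toList
  let dp := (List.range' 1 s.length).foldl (respaceAltBody words maxLen s) [(0 : Int)]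
  (PySem.List.pyGet? dp (-1)).getD 0                       -- return dp[-1]

-- ===== PRECONDITION & SPEC =====
def Spec_respace (dictionary : List String) (sentence : String) (out : Int) : Prop := out = respace_alt dictionary sentence
instance (dictionary : List String) (sentence : String) (out : Int) : Decidable (Spec_respace dictionary sentence out) := by unfold Spec_respace; infer_instance

-- ===== CLAIM (what is proved, stated in full; the proofs are below) =====
def Claim_equal_respace : Prop := ∀ (dictionary : List String) (sentence : String), Dom_respace dictionary sentence → Spec_respace dictionary sentence (respace dictionary sentence)

-- ===== LEMMAS AND PROOFS =====

-- sentence[j:i] on chars, in drop/take form (= the PySem slice at natural bounds)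
def sliceN (s : List Char) (j i : Nat) : List Char := (s.drop j).take (i - j)

-- A's inner loop step, rephrased as a pure min-accumulator over a FIXED snapshot dp
def gA (s : List Char) (iN : Nat) (dp : List Int) (c : Int) (w : List Char) : Int :=
  if w.length ≤ iN ∧ 1 ≤ w.length ∧ sliceN s (iN - w.length) iN = w then
    min c (dp.getD (iN - w.length) 0)
  else c

-- B's inner loop step with the slice already in drop/take form
def gB (dictL : List (List Char)) (s : List Char) (iN : Nat) (dp : List Int) (best : Int) (j : Nat) : Int :=
  if PySem.Set.contains (PySem.Set.ofList dictL) (sliceN s j iN) then min best (dp.getD j 0) else best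

lemma sliceN_len (s : List Char) (j i : Nat) (hi : i ≤ s.length) :
    (sliceN s j i).length = i - j := by
  simp [sliceN]; omega

lemma slice_eq_sliceN (s : List Char) (a b : Nat) :
    PySem.Chars.slice s (some (a:Int)) (some (b:Int)) = sliceN s a b := by
  simp [PySem.Chars.slice_eq_listSlice, PySem.List.slice_natCast, sliceN]

-- A's inner fold over the dictionary only rewrites cell iN; every proper read is below iN
lemma innerA_eq (s : List Char) (iN : Nat) (dictL : List (List Char)) (ca0 : List Int)
    (hi : iN < ca0.length) :
    ∀ c : Int, dictL.foldl (respaceInnerA s (iN:Int)) (ca0.set iN c)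
      = ca0.set iN (dictL.foldl (gA s iN ca0) c) := by
  induction dictL with
  | nil => intro c; simp
  | cons w t ih =>
    intro c
    have hstep : respaceInnerA s (iN:Int) (ca0.set iN c) w = ca0.set iN (gA s iN ca0 c w) := by
      unfold respaceInnerA gA
      by_cases hlt : (iN:Int) < (w.length : Int)
      · rw [if_pos hlt, if_neg (by omega)]
      · rw [if_neg hlt]
        have hle : w.length ≤ iN := by omega
        have hcast : (iN:Int) - (w.length:Int) = ((iN - w.length : Nat):Int) := by omega
        rw [hcast, slice_eq_sliceN]
        by_cases heq : w = sliceN s (iN - w.length) iN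
        · rw [if_pos heq]
          by_cases hz : w.length = 0
          · -- zero-length word: reads and rewrites cell iN itself, a no-op
            rw [if_neg (by omega)]
            simp only [hz, Nat.sub_zero, PySem.List.pyGet?_natCast, Int.toNat_natCast]
            rw [List.getElem?_set_self hi]
            simp [List.set_set]
          · rw [if_pos ⟨hle, by omega, heq.symm⟩]
            simp only [PySem.List.pyGet?_natCast, Int.toNat_natCast]
            rw [List.getElem?_set_self hi, List.getElem?_set_ne (by omega)]
            rw [List.set_set]
            simp [List.getD_eq_getElem?_getD]
        · rw [if_neg heq, if_neg (by intro h; exact heq h.2.2.symm)]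
    rw [List.foldl_cons, List.foldl_cons, hstep, ih]

-- a conditional min-fold is a plain min-fold over the filtered, mapped list
lemma foldl_ite_min {α : Type} (P : α → Prop) [DecidablePred P] (f : α → Int) :
    ∀ (l : List α) (a : Int),
      l.foldl (fun c x => if P x then min c (f x) else c) a
        = ((l.filter (fun x => decide (P x))).map f).foldl min a := by
  intro l
  induction l with
  | nil => intro a; simp
  | cons x t ih => intro a; by_cases h : P x <;> simp [h, ih]

-- a min-fold only depends on the SET of folded values
lemma foldl_min_eq_of_mem_iff (l1 l2 : List Int) (a : Int) (h : ∀ x, x ∈ l1 ↔ x ∈ l2) :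
    l1.foldl min a = l2.foldl min a := by
  have h1 := PySem.List.foldl_min_le l1 a
  have h2 := PySem.List.foldl_min_le l2 a
  apply le_antisymm
  · rcases PySem.List.foldl_min_mem l2 a with h' | h'
    · rw [h']; exact h1.1
    · exact h1.2 _ ((h _).mpr h')
  · rcases PySem.List.foldl_min_mem l1 a with h' | h'
    · rw [h']; exact h2.1
    · exact h2.2 _ ((h _).mp h')

-- the two inner loops fold min over the same set of dp-values
lemma inner_val_eq (dictL : List (List Char)) (s : List Char) (iN : Nat) (dp : List Int)
    (maxL : Nat) (hmax : ∀ w ∈ dictL, w.length ≤ maxL)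
    (h1 : 1 ≤ iN) (hiN : iN ≤ s.length) (c : Int) :
    dictL.foldl (gA s iN dp) c
      = (List.range' (iN - maxL) (iN - (iN - maxL))).foldl (gB dictL s iN dp) c := by
  have hA := foldl_ite_min
    (fun w : List Char => w.length ≤ iN ∧ 1 ≤ w.length ∧ sliceN s (iN - w.length) iN = w)
    (fun w => dp.getD (iN - w.length) 0) dictL c
  have hB := foldl_ite_min
    (fun j : Nat => PySem.Set.contains (PySem.Set.ofList dictL) (sliceN s j iN) = true)
    (fun j => dp.getD j 0) (List.range' (iN - maxL) (iN - (iN - maxL))) c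
  rw [show dictL.foldl (gA s iN dp) c = _ from hA,
      show (List.range' (iN - maxL) (iN - (iN - maxL))).foldl (gB dictL s iN dp) c = _ from hB]
  apply foldl_min_eq_of_mem_iff
  intro x
  simp only [List.mem_map, List.mem_filter, List.mem_range'_1, decide_eq_true_eq]
  constructor
  · rintro ⟨w, ⟨hw, hle, hpos, hsl⟩, hx⟩
    have hwmax := hmax w hw
    refine ⟨iN - w.length, ⟨⟨by omega, by omega⟩, ?_⟩, hx⟩
    rw [hsl]
    simp [PySem.Set.contains, PySem.Set.mem_ofList, hw]
  · rintro ⟨j, ⟨⟨hj1, hj2⟩, hcont⟩, hx⟩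
    have hji : j < iN := by omega
    have hw : sliceN s j iN ∈ dictL := by
      simpa [PySem.Set.contains, PySem.Set.mem_ofList] using hcont
    have hlen : (sliceN s j iN).length = iN - j := sliceN_len s j iN hiN
    refine ⟨sliceN s j iN, ⟨hw, by omega, by omega, ?_⟩, ?_⟩
    · rw [hlen, show iN - (iN - j) = j by omega]
    · rw [hlen, show iN - (iN - j) = j by omega]; exact hx

-- B's loop body equals the sliceN form
lemma altBody_eq (dictL : List (List Char)) (maxL : Nat) (s : List Char) (dp : List Int) (i : Nat) :
    respaceAltBody (PySem.Set.ofList dictL) maxL s dp i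
      = dp ++ [(List.range' (i - maxL) (i - (i - maxL))).foldl (gB dictL s i dp) (dp.getD (i-1) 0 + 1)] := by
  unfold respaceAltBody gB
  simp only [slice_eq_sliceN]

-- the main loop invariant: after m iterations A's array is B's dp padded with zeros
lemma invariant (dictL : List (List Char)) (s : List Char) (n maxL : Nat)
    (hn : n = s.length) (hmax : ∀ w ∈ dictL, w.length ≤ maxL) :
    ∀ m, m ≤ n →
      ((List.range m).foldl (fun ca (k : Nat) => respaceBodyA dictL s ca (1 + (k:Int)))
          (List.replicate (n+1) 0)
        = (List.range' 1 m).foldl (respaceAltBody (PySem.Set.ofList dictL) maxL s) [(0:Int)]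
            ++ List.replicate (n - m) 0)
      ∧ ((List.range' 1 m).foldl (respaceAltBody (PySem.Set.ofList dictL) maxL s) [(0:Int)]).length
          = m + 1 := by
  intro m
  induction m with
  | zero => intro _; simp [List.replicate_succ]
  | succ m ih =>
    intro hm1
    obtain ⟨ihA, ihL⟩ := ih (by omega)
    set dp := (List.range' 1 m).foldl (respaceAltBody (PySem.Set.ofList dictL) maxL s) [(0:Int)] with hdp
    rw [List.range_succ, List.range'_1_concat]
    simp only [List.foldl_append, List.foldl_cons, List.foldl_nil]
    rw [ihA, ← hdp]
    have hiN : (1:Int) + (m:Int) = ((m+1 : Nat) : Int) := by omega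
    have h1m : 1 + m = m + 1 := by omega
    rw [hiN, h1m, altBody_eq]
    set iN := m + 1 with hiNdef
    have hlen : (dp ++ List.replicate (n - m) 0).length = n + 1 := by
      simp [ihL]; omega
    have hi : iN < (dp ++ List.replicate (n - m) 0).length := by omega
    -- unfold A's body at index iN
    unfold respaceBodyA
    simp only [PySem.List.pyGet?_natCast, Int.toNat_natCast,
      show ((iN:Nat):Int) - 1 = ((m:Nat):Int) by omega]
    rw [show iN - 1 = m from by omega]
    have hread : (((dp ++ List.replicate (n - m) 0)[m]?).getD 0) = dp.getD m 0 := by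
      rw [← List.getD_eq_getElem?_getD, List.getD_append _ _ _ _ (by omega)]
    rw [hread]
    rw [innerA_eq s iN dictL _ hi]
    have hg : ∀ c w, gA s iN (dp ++ List.replicate (n - m) 0) c w = gA s iN dp c w := by
      intro c w
      unfold gA
      split_ifs with h
      · rw [List.getD_append _ _ _ _ (by omega)]
      · rfl
    rw [show gA s iN (dp ++ List.replicate (n - m) 0) = gA s iN dp from
      funext fun c => funext fun w => hg c w]
    rw [inner_val_eq dictL s iN dp maxL hmax (by omega) (by omega)]
    -- the write at iN lands exactly on the first padding zero
    have hpad : List.replicate (n - m) (0:Int) = 0 :: List.replicate (n - (m+1)) 0 := by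
      rw [show n - m = (n - (m+1)) + 1 by omega, List.replicate_succ]
    rw [hpad, List.set_append_right _ _ (by omega),
      show iN - dp.length = 0 by omega]
    constructor
    · simp; omega
    · simp [ihL]

-- ===== VERDICT (by name: the statement is the Claim_ definition above) =====
theorem respace_spec : Claim_equal_respace := by
  intro dictionary sentence _dom
  unfold Spec_respace
  simp only [respace, respace_alt]
  have hmax : ∀ w ∈ dictionary.map String.toList,
      w.length ≤ (dictionary.map (fun w => w.toList.length)).foldl max 0 := by
    intro w hw
    rw [List.foldl_map]
    rcases List.mem_map.mp hw with ⟨ws, hws, rfl⟩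
    exact (PySem.List.le_foldl_max_nat dictionary (fun w => w.toList.length) 0).2 ws hws
  obtain ⟨hfold, _⟩ := invariant (dictionary.map String.toList) sentence.toList
    sentence.toList.length ((dictionary.map (fun w => w.toList.length)).foldl max 0)
    rfl hmax sentence.toList.length (le_refl _)
  rw [PySem.List.pyRange_one]
  rw [show ((sentence.toList.length : Int) + 1 - 1).toNat = sentence.toList.length by omega]
  rw [List.foldl_map]
  rw [show (List.range (sentence.toList.length + 1)).map (fun _ => (0:Int))
        = List.replicate (sentence.toList.length + 1) 0 from by simp [List.map_const']]
  rw [hfold]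
  simp
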